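-- pv_equiv track=rewrite | github.com/Jaxcho/New-Problems-Page | backend/workspace.py | latexify
-- ===== SOURCE A (Python) =====
-- def latexify(string):
--     a=0
--     final=''
--     lists=[]
--     first=True
--     string=list(string)
--     for i in range(len(string)):
--
--         if string[i]=='$':
--             lists.append(string[a:i])
--             a=i
--
--     lists.append(string[a:len(string)])
--     for i in range(len(lists)):
--         if i==0:
--
--             final+="".join(lists[i])
--         elif first:
--             final += '\\('
--             first= not first
--             final+=''.join(lists[i][1:])
--         elif not first:
--             final += '\\)'
--             first = not first
--             final += ''.join(lists[i][1:])
--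
--     return final
-- ===== SOURCE B (Python) =====
-- def latexify(string):
--     out = []
--     opened = True
--     for ch in string:
--         if ch == '$':
--             out.append('\\(' if opened else '\\)')
--             opened = not opened
--         else:
--             out.append(ch)
--     return ''.join(out)
-- ===== Notes on version B (the rewrite author's own statement) =====
-- stated objective: simpler
-- what changed: Replaces A's two-pass design (collect '$'-delimited slices into a list, then join them with alternating delimiters while stripping each slice's leading '$') by a single streaming pass that copies characters and rewrites each '$' in place as \( or \) via one flipping boolean.
import Mathlib
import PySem

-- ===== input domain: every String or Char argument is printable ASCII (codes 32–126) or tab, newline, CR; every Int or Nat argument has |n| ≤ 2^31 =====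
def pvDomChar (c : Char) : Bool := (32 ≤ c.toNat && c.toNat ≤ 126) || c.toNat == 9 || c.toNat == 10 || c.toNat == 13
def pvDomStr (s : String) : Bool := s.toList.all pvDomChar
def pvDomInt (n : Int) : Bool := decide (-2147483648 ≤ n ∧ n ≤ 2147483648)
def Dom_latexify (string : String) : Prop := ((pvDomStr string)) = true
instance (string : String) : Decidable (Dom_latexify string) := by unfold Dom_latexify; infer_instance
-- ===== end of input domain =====

-- B replaces A's two-pass slice-and-join scheme by one streaming pass with a flipping boolean (objective: simpler).

-- ===== PORT A =====
-- Loop 1: collect the slices string[a:i] at each '$' (state: (a, lists)).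
def latexifyStep1 (s : List Char) (st : Nat × List (List Char)) (i : Nat) :
    Nat × List (List Char) :=
  if PySem.List.pyGetD s (i : Int) ' ' = '$' then
    (i, st.2 ++ [PySem.List.slice s (some (st.1 : Int)) (some (i : Int))])
  else st

-- Loop 2: join, alternating '\\(' / '\\)' and dropping each later slice's leading '$'.
def latexifyStep2 (lists : List (List Char)) (st : List Char × Bool) (i : Nat) :
    List Char × Bool :=
  let li := PySem.List.pyGetD lists (i : Int) []
  if i = 0 then
    (st.1 ++ PySem.Chars.join [] (li.map (fun c => [c])), st.2)
  else if st.2 then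
    (st.1 ++ ['\\', '('] ++
      PySem.Chars.join [] ((PySem.List.slice li (some 1) none).map (fun c => [c])), !st.2)
  else
    (st.1 ++ ['\\', ')'] ++
      PySem.Chars.join [] ((PySem.List.slice li (some 1) none).map (fun c => [c])), !st.2)

def latexify (string : String) : String :=
  let s := string.toList
  let p := (List.range s.length).foldl (latexifyStep1 s) (0, [])
  let lists := p.2 ++ [PySem.List.slice s (some (p.1 : Int)) (some (s.length : Int))]
  let q := (List.range lists.length).foldl (latexifyStep2 lists) ([], true)
  String.ofList q.1

-- ===== PORT B =====
-- One pass: copy characters, rewrite each '$' as '\\(' or '\\)' per a flipping boolean.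
def latexifyAltStep (st : List (List Char) × Bool) (ch : Char) : List (List Char) × Bool :=
  if ch = '$' then
    (st.1 ++ [if st.2 then ['\\', '('] else ['\\', ')']], !st.2)
  else
    (st.1 ++ [[ch]], st.2)

def latexify_alt (string : String) : String :=
  let r := string.toList.foldl latexifyAltStep ([], true)
  String.ofList (PySem.Chars.join [] r.1)

-- ===== PRECONDITION & SPEC =====
def Spec_latexify (string : String) (out : String) : Prop := out = latexify_alt string
instance (string : String) (out : String) : Decidable (Spec_latexify string out) := by unfold Spec_latexify; infer_instance

-- ===== CLAIM (what is proved, stated in full; the proofs are below) =====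
def Claim_equal_latexify : Prop := ∀ (string : String), Dom_latexify string → Spec_latexify string (latexify string)

-- ===== LEMMAS AND PROOFS =====

-- The streamed output of B: each '$' becomes '\\(' or '\\)', flipping b.
def pvG : List Char → Bool → List Char
  | [], _ => []
  | c :: t, b =>
    if c = '$' then (if b then ['\\', '('] else ['\\', ')']) ++ pvG t (!b)
    else c :: pvG t b

-- A's loop 1 as a recursion on the string: first segment, then one segment per '$'
-- (each later segment keeps its leading '$').
def pvSplit : List Char → List Char → List (List Char)
  | cur, [] => [cur]
  | cur, c :: t => if c = '$' then cur :: pvSplit ['$'] t else pvSplit (cur ++ [c]) t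

-- A's loop 2 on the tail segments: delimiter per segment, drop the leading '$', flip b.
def pvRend : List (List Char) → Bool → List Char × Bool
  | [], b => ([], b)
  | l :: t, b =>
    let r := pvRend t (!b)
    ((if b then ['\\', '('] else ['\\', ')']) ++ l.drop 1 ++ r.1, r.2)

theorem pvJoin_flatten (l : List (List Char)) : PySem.Chars.join [] l = l.flatten := by
  induction l with
  | nil => rfl
  | cons x xs ih =>
    cases xs with
    | nil => simp [PySem.Chars.join, List.intercalate]
    | cons y ys =>
      rw [PySem.Chars.join_cons_cons] at *
      simp [ih]

theorem pvB_fold (s : List Char) (acc : List (List Char)) (b : Bool) :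
    PySem.Chars.join [] (s.foldl latexifyAltStep (acc, b)).1
      = PySem.Chars.join [] acc ++ pvG s b := by
  induction s generalizing acc b with
  | nil => simp [pvG]
  | cons c t ih =>
    by_cases h : c = '$' <;>
      simp [latexifyAltStep, pvG, h, ih, pvJoin_flatten, List.append_assoc]

theorem pvA_loop1 (s : List Char) :
    ∀ (m j a : Nat) (L : List (List Char)), a ≤ j → j + m = s.length →
    ((List.range' j m).foldl (latexifyStep1 s) (a, L)).2
      ++ [PySem.List.slice s
            (some ((((List.range' j m).foldl (latexifyStep1 s) (a, L)).1 : Nat) : Int))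
            (some (s.length : Int))]
      = L ++ pvSplit (PySem.List.slice s (some (a : Int)) (some (j : Int))) (s.drop j) := by
  intro m
  induction m with
  | zero =>
    intro j a L haj hlen
    simp only [List.range'_zero, List.foldl_nil]
    have hj : j = s.length := by omega
    subst hj
    simp [pvSplit, List.drop_length]
  | succ m ih =>
    intro j a L haj hlen
    have hj : j < s.length := by omega
    have hdrop : s.drop j = s[j] :: s.drop (j + 1) :=
      List.drop_eq_getElem_cons hj
    rw [List.range'_succ, List.foldl_cons]
    by_cases h : s[j] = '$'
    · have hget : PySem.List.pyGetD s (j : Int) ' ' = '$' := by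
        rw [PySem.List.pyGetD_natCast, List.getD_eq_getElem _ _ hj, h]
      have hstep : latexifyStep1 s (a, L) j
          = (j, L ++ [PySem.List.slice s (some (a : Int)) (some (j : Int))]) := by
        rw [latexifyStep1, if_pos hget]
      rw [hstep,
        ih (j + 1) j (L ++ [PySem.List.slice s (some (a : Int)) (some (j : Int))])
          (by omega) (by omega)]
      have hone : PySem.List.slice s (some (j : Int)) (some ((j + 1 : Nat) : Int))
          = ['$'] := by
        rw [PySem.List.slice_natCast]
        have h1 : j + 1 - j = 1 := by omega
        rw [h1, hdrop]
        simp [h]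
      rw [hone, hdrop]
      simp [pvSplit, h, List.append_assoc]
    · have hget : ¬ PySem.List.pyGetD s (j : Int) ' ' = '$' := by
        rw [PySem.List.pyGetD_natCast, List.getD_eq_getElem _ _ hj]; exact h
      have hstep : latexifyStep1 s (a, L) j = (a, L) := by
        rw [latexifyStep1, if_neg hget]
      rw [hstep, ih (j + 1) a L (by omega) (by omega)]
      have hsl : PySem.List.slice s (some (a : Int)) (some ((j + 1 : Nat) : Int))
          = PySem.List.slice s (some (a : Int)) (some (j : Int)) ++ [s[j]] := by
        rw [PySem.List.slice_natCast, PySem.List.slice_natCast]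
        have h1 : j + 1 - a = (j - a) + 1 := by omega
        rw [h1, List.take_add_one, List.getElem?_drop]
        have h2 : a + (j - a) = j := by omega
        rw [h2, List.getElem?_eq_getElem hj]
        rfl
      rw [hsl, hdrop]
      simp [pvSplit, h]

theorem pvA_loop2 (t : List (List Char)) :
    ∀ (pre : List (List Char)) (acc : List Char) (b : Bool), pre ≠ [] →
    (List.range' pre.length t.length).foldl (latexifyStep2 (pre ++ t)) (acc, b)
      = (acc ++ (pvRend t b).1, (pvRend t b).2) := by
  induction t with
  | nil => intro pre acc b _; simp [pvRend]
  | cons l t ih =>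
    intro pre acc b hpre
    rw [List.length_cons, List.range'_succ, List.foldl_cons]
    have hlen : pre.length < (pre ++ l :: t).length := by simp
    have hget : PySem.List.pyGetD (pre ++ l :: t) ((pre.length : Nat) : Int) [] = l := by
      rw [PySem.List.pyGetD_natCast, List.getD_eq_getElem _ _ hlen,
        List.getElem_append_right (Nat.le_refl _)]
      simp
    have hne : pre.length ≠ 0 := by
      simpa [List.length_eq_zero_iff] using hpre
    have hstep : latexifyStep2 (pre ++ l :: t) (acc, b) pre.length
        = (acc ++ (if b then ['\\', '('] else ['\\', ')']) ++ l.drop 1, !b) := by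
      rw [latexifyStep2]
      simp only [hget, if_neg hne, PySem.List.slice_from_one, ← List.drop_one,
        PySem.Chars.join_nil_singletons]
      by_cases hb : b <;> simp [hb, List.append_assoc]
    rw [hstep]
    have hsplit : pre ++ l :: t = (pre ++ [l]) ++ t := by simp
    have hplen : pre.length + 1 = (pre ++ [l]).length := by simp
    rw [hsplit, hplen, ih (pre ++ [l]) _ (!b) (by simp)]
    simp [pvRend, List.append_assoc]

theorem pvSplit_pvG_tail (s : List Char) :
    ∀ (cur : List Char) (b : Bool),
    (pvRend (pvSplit ('$' :: cur) s) b).1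
      = (if b then ['\\', '('] else ['\\', ')']) ++ cur ++ pvG s (!b) := by
  induction s with
  | nil => intro cur b; simp [pvSplit, pvRend, pvG]
  | cons c t ih =>
    intro cur b
    by_cases h : c = '$'
    · subst h
      have he : pvSplit ('$' :: cur) ('$' :: t) = ('$' :: cur) :: pvSplit ['$'] t := by
        simp [pvSplit]
      rw [he]
      simp only [pvRend]
      rw [ih [] (!b)]
      simp [pvG, List.append_assoc]
    · have he : pvSplit ('$' :: cur) (c :: t) = pvSplit ('$' :: (cur ++ [c])) t := by
        simp [pvSplit, h]
      rw [he, ih (cur ++ [c]) b]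
      simp [pvG, h, List.append_assoc]

theorem pvSplit_pvG (s : List Char) :
    ∀ (cur : List Char),
    (match pvSplit cur s with
     | [] => []
     | h :: t => h ++ (pvRend t true).1) = cur ++ pvG s true := by
  induction s with
  | nil => intro cur; simp [pvSplit, pvRend, pvG]
  | cons c t ih =>
    intro cur
    by_cases h : c = '$'
    · have he : pvSplit cur ('$' :: t) = cur :: pvSplit ['$'] t := by simp [pvSplit]
      subst h
      rw [he]
      show cur ++ (pvRend (pvSplit ['$'] t) true).1 = _
      rw [pvSplit_pvG_tail t [] true]
      simp [pvG]
    · have he : pvSplit cur (c :: t) = pvSplit (cur ++ [c]) t := by simp [pvSplit, h]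
      rw [he, ih (cur ++ [c])]
      simp [pvG, h, List.append_assoc]

theorem pvSplit_ne_nil (s : List Char) : ∀ cur, pvSplit cur s ≠ [] := by
  induction s with
  | nil => intro cur; simp [pvSplit]
  | cons c t ih =>
    intro cur
    by_cases h : c = '$' <;> simp [pvSplit, h, ih]

-- ===== VERDICT (by name: the statement is the Claim_ definition above) =====
theorem latexify_spec : Claim_equal_latexify := by
  intro string _
  unfold Spec_latexify latexify latexify_alt
  simp only
  set s := string.toList with hs
  have h1 := pvA_loop1 s s.length 0 0 [] (Nat.le_refl 0) (by omega)
  rw [← List.range_eq_range'] at h1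
  have hsl0 : PySem.List.slice s (some ((0 : Nat) : Int)) (some ((0 : Nat) : Int)) = [] := by
    rw [PySem.List.slice_natCast]; simp
  rw [hsl0, List.drop_zero, List.nil_append] at h1
  rw [h1]
  obtain ⟨h, t, hht⟩ : ∃ h t, pvSplit [] s = h :: t := by
    cases hsp : pvSplit [] s with
    | nil => exact absurd hsp (pvSplit_ne_nil s [])
    | cons h t => exact ⟨h, t, rfl⟩
  rw [hht]
  have hrange : List.range (h :: t).length = 0 :: List.range' 1 t.length := by
    rw [List.length_cons, List.range_eq_range', List.range'_succ]
  rw [hrange, List.foldl_cons]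
  have hstep0 : latexifyStep2 (h :: t) ([], true) 0 = (h, true) := by
    rw [latexifyStep2]
    simp [PySem.Chars.join_nil_singletons]
  rw [hstep0]
  have h2 := pvA_loop2 t [h] h true (by simp)
  simp only [List.length_cons, List.length_nil, List.singleton_append] at h2
  rw [h2]
  rw [pvB_fold s [] true]
  have h3 := pvSplit_pvG s []
  rw [hht] at h3
  simp only [List.nil_append] at h3
  simp [h3]
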